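-- pv_equiv track=rewrite | github.com/martagrz/structural_consumer_preferences | experiments/dominicks/data.py | _classify
-- ===== SOURCE A (Python) =====
-- _IBU_KEYS = [
--     'ADVIL', '#ADVIL', 'MOTRIN', '#MOTRIN', '~MOTRIN',
--     'IBUPROFEN', 'NUPRIN', '~NUPRIN', 'ALEVE', 'IBUPRIN',
--     'ACTRON', 'ORUDIS', 'HALTRAN', 'MEDIPREN',
--     'MIDOL 200', 'MIDOL IB', '~MIDOL IB', 'MYDOL 200', 'MENADOL',
--     'TRENDAR', 'VITALAN', 'DOM IBUPROFEN', 'DOMINICKS TAB-PROFEN',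
--     'TC IBUROFEN', 'TOPCARE IBUPROFEN',
--     'EXCEDRIN IB', '~EXCEDRIN IB', '~ARTH FNDT IB',
--     'F/S ADVIL', 'TRL-SZ ADVIL', 'TRL-SZ MOTRIN',
-- ]
--
-- _ACET_KEYS = [
--     'TYLENOL', 'TYLNL', 'ACETAMINOPHEN',
--     'EXCEDRIN ASPIRIN-FREE', 'EXCEDRIN A/F', 'A/F EXCEDRIN',
--     'A/F 20 CT EXCEDRIN', 'A/F 80 CT EXCEDRIN',
--     '~A/F 40 CT EXCEDRIN', '*EXCEDRIN',
--     'EXCEDRIN 175', 'EXCEDRIN CAPS', 'EXCEDRIN CAP ',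
--     'EXCEDRIN DUAL', 'EXCEDRIN GELTAB', 'EXCEDRIN TAB',
--     'EXCEDRIN TABS', 'EXCEDRIN X', 'EXCEDRIN PM', 'EXCEDRIN P M',
--     'EXCEDRIN P.M', 'EXCERIN PM', 'TRL-SZ EXCEDRIN', '~EXCEDRIN P.M',
--     'PANADOL', 'DATRIL',
--     'PAMPRIN', '~PAMPRIN',
--     'ANACIN-3', 'ANACIN 3 ', 'M/S ANACIN 3', 'JHO-ANACIN 3',
--     'ANACIN A/F', '~ANACIN A/F', '~ASP FREE ANANCIN', '~ASPIRIN FREE ANACIN',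
--     'DOM NON-ASP', 'DOM NON ASP', 'DOM X/S NON', 'DOM X-STR NON',
--     'DOM REG STR NON', 'DOM CHILD CHEW', 'DOM CHILDS', 'DOM E/S NON',
--     'DOM ADDED STRENGTH A', 'DOM X/S PAIN RELIEVE',
--     'ST JOSEPH A/F', 'TC NON-ASP', 'TC X/STR N/A',
--     'TEMPRA', 'FEVERALL', 'DORCOL', 'FEVERNOL', 'LIQUIPRIN',
--     'PEDIA CARE INFANT', '$TC PAIN REL INFANT',
--     'CHILD CHEW FRT TYLE', 'CHILD CHEW GRAP TYLE',
--     'TS TYLENOL CHEW', 'CHLDRN PANADOL',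
--     'VALUE TIME ACETA',
--     'MIDOL CAPLET', 'MIDOL CAPLETS MAX', 'MIDOL M/S', 'MIDOL MAXIMUM',
--     'MIDOL PM', 'MIDOL PMS', 'MIDOLPMS', 'T/S MIDOL PM', '~MIDOL PM',
--     'TEEN MIDOL', '~TEEN MIDOL',
--     'PREMSYN PMS', 'PMS BALANCE', '~TC PMS',
--     'X/S CAPLETS', 'XS LIQUID', 'X/S TYLENOL',
--     'YL PHARMACIST', 'E.S TYLENOL', 'ES TYLENOL', 'EX STR TYLENOL',
--     'EX TYLENOL', 'TRL-SZ EXCEDRIN',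
--     '~TYLENOL', '~ANACIN A/F',
-- ]
--
-- _ASP_KEYS = [
--     'ASPIRIN', 'BAYER', '~BAYER', 'BUFFERIN', '~BUFFERIN',
--     'ASCRIPTIN', '~ACSRIPTIN', 'ECOTRIN', 'EMPIRIN', 'HALFRIN',
--     'NORWICH', 'VALUE TIME ASP', 'DOM COATED ASP', 'DOM ENTERIC COATED',
--     'DOM TRI0BUFFERED', 'RUGBY COATED ASPIRIN', 'GENUINE BAYER',
--     'EXTRA STRENGTH BAYER', 'CAMA ARTHRITIS', 'VANQUISH',
--     'COPE TABS', 'MOMENTUM CAP', 'MOMENTUN CAP', '~MOMENTUM',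
--     'BACKAID', 'B.C ', 'BC HEADACHE', 'CONGESPIRIN',
--     'DOMINICKS CHILD ASPI',
--     'ANACIN TABS', 'ANACIN CAP', 'ANACIN CPLT', 'ANACIN MAX',
--     'ANACIN ARTH', 'ANACIN TABLETS',
--     'JHO-ANACIN PEGABLE', 'T/S F/S ANACIN PM',
--     'ARTH FNDTN ASP',
--     '~ANACIN 125', '~ANACIN EASY', '~ANACIN MAX TAB', '~ANANCIN PAIN FORM',
--     'MAX BAYER', 'EX BAYER', 'F/S BAYER', 'T/S BAYER', 'F/S NORWICH',
-- ]
--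
-- def _classify(descrip: str) -> str:
--     """Classify one DESCRIP string. IBU checked first to handle Excedrin IB."""
--     d = descrip.upper()
--     for k in _IBU_KEYS:
--         if k.upper() in d:
--             return 'IBU'
--     for k in _ACET_KEYS:
--         if k.upper() in d:
--             return 'ACET'
--     for k in _ASP_KEYS:
--         if k.upper() in d:
--             return 'ASP'
--     return 'OTHER'
-- ===== SOURCE B (Python) =====
-- # Flat one-table spec: each entry is a class label, a colon, then the key; parsed
-- # once at import into a key->rank hash index (rank = class priority, first entry wins on duplicates).
-- _TABLE = [
--     'IBU:ADVIL',
--     'IBU:#ADVIL',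
--     'IBU:MOTRIN',
--     'IBU:#MOTRIN',
--     'IBU:~MOTRIN',
--     'IBU:IBUPROFEN',
--     'IBU:NUPRIN',
--     'IBU:~NUPRIN',
--     'IBU:ALEVE',
--     'IBU:IBUPRIN',
--     'IBU:ACTRON',
--     'IBU:ORUDIS',
--     'IBU:HALTRAN',
--     'IBU:MEDIPREN',
--     'IBU:MIDOL 200',
--     'IBU:MIDOL IB',
--     'IBU:~MIDOL IB',
--     'IBU:MYDOL 200',
--     'IBU:MENADOL',
--     'IBU:TRENDAR',
--     'IBU:VITALAN',
--     'IBU:DOM IBUPROFEN',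
--     'IBU:DOMINICKS TAB-PROFEN',
--     'IBU:TC IBUROFEN',
--     'IBU:TOPCARE IBUPROFEN',
--     'IBU:EXCEDRIN IB',
--     'IBU:~EXCEDRIN IB',
--     'IBU:~ARTH FNDT IB',
--     'IBU:F/S ADVIL',
--     'IBU:TRL-SZ ADVIL',
--     'IBU:TRL-SZ MOTRIN',
--     'ACET:TYLENOL',
--     'ACET:TYLNL',
--     'ACET:ACETAMINOPHEN',
--     'ACET:EXCEDRIN ASPIRIN-FREE',
--     'ACET:EXCEDRIN A/F',
--     'ACET:A/F EXCEDRIN',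
--     'ACET:A/F 20 CT EXCEDRIN',
--     'ACET:A/F 80 CT EXCEDRIN',
--     'ACET:~A/F 40 CT EXCEDRIN',
--     'ACET:*EXCEDRIN',
--     'ACET:EXCEDRIN 175',
--     'ACET:EXCEDRIN CAPS',
--     'ACET:EXCEDRIN CAP ',
--     'ACET:EXCEDRIN DUAL',
--     'ACET:EXCEDRIN GELTAB',
--     'ACET:EXCEDRIN TAB',
--     'ACET:EXCEDRIN TABS',
--     'ACET:EXCEDRIN X',
--     'ACET:EXCEDRIN PM',
--     'ACET:EXCEDRIN P M',
--     'ACET:EXCEDRIN P.M',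
--     'ACET:EXCERIN PM',
--     'ACET:TRL-SZ EXCEDRIN',
--     'ACET:~EXCEDRIN P.M',
--     'ACET:PANADOL',
--     'ACET:DATRIL',
--     'ACET:PAMPRIN',
--     'ACET:~PAMPRIN',
--     'ACET:ANACIN-3',
--     'ACET:ANACIN 3 ',
--     'ACET:M/S ANACIN 3',
--     'ACET:JHO-ANACIN 3',
--     'ACET:ANACIN A/F',
--     'ACET:~ANACIN A/F',
--     'ACET:~ASP FREE ANANCIN',
--     'ACET:~ASPIRIN FREE ANACIN',
--     'ACET:DOM NON-ASP',
--     'ACET:DOM NON ASP',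
--     'ACET:DOM X/S NON',
--     'ACET:DOM X-STR NON',
--     'ACET:DOM REG STR NON',
--     'ACET:DOM CHILD CHEW',
--     'ACET:DOM CHILDS',
--     'ACET:DOM E/S NON',
--     'ACET:DOM ADDED STRENGTH A',
--     'ACET:DOM X/S PAIN RELIEVE',
--     'ACET:ST JOSEPH A/F',
--     'ACET:TC NON-ASP',
--     'ACET:TC X/STR N/A',
--     'ACET:TEMPRA',
--     'ACET:FEVERALL',
--     'ACET:DORCOL',
--     'ACET:FEVERNOL',
--     'ACET:LIQUIPRIN',
--     'ACET:PEDIA CARE INFANT',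
--     'ACET:$TC PAIN REL INFANT',
--     'ACET:CHILD CHEW FRT TYLE',
--     'ACET:CHILD CHEW GRAP TYLE',
--     'ACET:TS TYLENOL CHEW',
--     'ACET:CHLDRN PANADOL',
--     'ACET:VALUE TIME ACETA',
--     'ACET:MIDOL CAPLET',
--     'ACET:MIDOL CAPLETS MAX',
--     'ACET:MIDOL M/S',
--     'ACET:MIDOL MAXIMUM',
--     'ACET:MIDOL PM',
--     'ACET:MIDOL PMS',
--     'ACET:MIDOLPMS',
--     'ACET:T/S MIDOL PM',
--     'ACET:~MIDOL PM',
--     'ACET:TEEN MIDOL',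
--     'ACET:~TEEN MIDOL',
--     'ACET:PREMSYN PMS',
--     'ACET:PMS BALANCE',
--     'ACET:~TC PMS',
--     'ACET:X/S CAPLETS',
--     'ACET:XS LIQUID',
--     'ACET:X/S TYLENOL',
--     'ACET:YL PHARMACIST',
--     'ACET:E.S TYLENOL',
--     'ACET:ES TYLENOL',
--     'ACET:EX STR TYLENOL',
--     'ACET:EX TYLENOL',
--     'ACET:TRL-SZ EXCEDRIN',
--     'ACET:~TYLENOL',
--     'ACET:~ANACIN A/F',
--     'ASP:ASPIRIN',
--     'ASP:BAYER',
--     'ASP:~BAYER',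
--     'ASP:BUFFERIN',
--     'ASP:~BUFFERIN',
--     'ASP:ASCRIPTIN',
--     'ASP:~ACSRIPTIN',
--     'ASP:ECOTRIN',
--     'ASP:EMPIRIN',
--     'ASP:HALFRIN',
--     'ASP:NORWICH',
--     'ASP:VALUE TIME ASP',
--     'ASP:DOM COATED ASP',
--     'ASP:DOM ENTERIC COATED',
--     'ASP:DOM TRI0BUFFERED',
--     'ASP:RUGBY COATED ASPIRIN',
--     'ASP:GENUINE BAYER',
--     'ASP:EXTRA STRENGTH BAYER',
--     'ASP:CAMA ARTHRITIS',
--     'ASP:VANQUISH',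
--     'ASP:COPE TABS',
--     'ASP:MOMENTUM CAP',
--     'ASP:MOMENTUN CAP',
--     'ASP:~MOMENTUM',
--     'ASP:BACKAID',
--     'ASP:B.C ',
--     'ASP:BC HEADACHE',
--     'ASP:CONGESPIRIN',
--     'ASP:DOMINICKS CHILD ASPI',
--     'ASP:ANACIN TABS',
--     'ASP:ANACIN CAP',
--     'ASP:ANACIN CPLT',
--     'ASP:ANACIN MAX',
--     'ASP:ANACIN ARTH',
--     'ASP:ANACIN TABLETS',
--     'ASP:JHO-ANACIN PEGABLE',
--     'ASP:T/S F/S ANACIN PM',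
--     'ASP:ARTH FNDTN ASP',
--     'ASP:~ANACIN 125',
--     'ASP:~ANACIN EASY',
--     'ASP:~ANACIN MAX TAB',
--     'ASP:~ANANCIN PAIN FORM',
--     'ASP:MAX BAYER',
--     'ASP:EX BAYER',
--     'ASP:F/S BAYER',
--     'ASP:T/S BAYER',
--     'ASP:F/S NORWICH',
-- ]
--
-- _CLASS_ORDER = ['IBU', 'ACET', 'ASP']
--
-- _KEY_RANK = {}
-- for _e in _TABLE:
--     _label, _key = _e.split(':', 1)
--     _KEY_RANK.setdefault(_key.upper(), _CLASS_ORDER.index(_label))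
-- _LENGTHS = sorted({len(_k) for _k in _KEY_RANK})
--
--
-- def _classify(descrip: str) -> str:
--     # single scan: at each position try only the key lengths that occur;
--     # dict lookups replace per-key substring searches
--     d = descrip.upper()
--     best = 3
--     for i in range(len(d)):
--         for n in _LENGTHS:
--             r = _KEY_RANK.get(d[i:i + n], 3)
--             if r < best:
--                 best = r
--     return 'IBU' if best == 0 else 'ACET' if best == 1 else 'ASP' if best == 2 else 'OTHER'
-- ===== Notes on version B (the rewrite author's own statement) =====
-- stated objective: alternative
-- what changed: A keeps three priority-ordered literal key lists and runs a substring search over the text for every one of ~160 keys, returning at the first hit; B keeps one flat flat class-prefixed key table (each entry is a class label, a colon, then the key) parsed once at import into a key-to-rank hash index plus the set of occurring key lengths, then makes a single scan of the description taking, at each position, the minimum rank found by dictionary lookups of the slices of those lengths.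
import Mathlib
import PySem

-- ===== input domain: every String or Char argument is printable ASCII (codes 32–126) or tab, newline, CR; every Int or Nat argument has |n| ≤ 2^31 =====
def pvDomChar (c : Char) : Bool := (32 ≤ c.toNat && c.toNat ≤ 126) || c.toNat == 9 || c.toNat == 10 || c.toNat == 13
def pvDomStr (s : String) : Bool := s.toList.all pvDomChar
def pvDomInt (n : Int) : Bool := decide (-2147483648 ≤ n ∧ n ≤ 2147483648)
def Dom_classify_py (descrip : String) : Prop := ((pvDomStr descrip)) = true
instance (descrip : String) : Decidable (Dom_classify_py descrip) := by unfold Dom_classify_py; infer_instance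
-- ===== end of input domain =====

-- B replaces A's three literal key lists and per-key substring searches by a flat
-- class-prefixed key table parsed once into a key→rank hash index, then a single scan of
-- the description trying only the key lengths that occur (alternative algorithm;
-- same classification proved equal).

-- ===== PORT A =====
def ibuKeys : List String := ["ADVIL",
  "#ADVIL",
  "MOTRIN",
  "#MOTRIN",
  "~MOTRIN",
  "IBUPROFEN",
  "NUPRIN",
  "~NUPRIN",
  "ALEVE",
  "IBUPRIN",
  "ACTRON",
  "ORUDIS",
  "HALTRAN",
  "MEDIPREN",
  "MIDOL 200",
  "MIDOL IB",
  "~MIDOL IB",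
  "MYDOL 200",
  "MENADOL",
  "TRENDAR",
  "VITALAN",
  "DOM IBUPROFEN",
  "DOMINICKS TAB-PROFEN",
  "TC IBUROFEN",
  "TOPCARE IBUPROFEN",
  "EXCEDRIN IB",
  "~EXCEDRIN IB",
  "~ARTH FNDT IB",
  "F/S ADVIL",
  "TRL-SZ ADVIL",
  "TRL-SZ MOTRIN"]

def acetKeys : List String := ["TYLENOL",
  "TYLNL",
  "ACETAMINOPHEN",
  "EXCEDRIN ASPIRIN-FREE",
  "EXCEDRIN A/F",
  "A/F EXCEDRIN",
  "A/F 20 CT EXCEDRIN",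
  "A/F 80 CT EXCEDRIN",
  "~A/F 40 CT EXCEDRIN",
  "*EXCEDRIN",
  "EXCEDRIN 175",
  "EXCEDRIN CAPS",
  "EXCEDRIN CAP ",
  "EXCEDRIN DUAL",
  "EXCEDRIN GELTAB",
  "EXCEDRIN TAB",
  "EXCEDRIN TABS",
  "EXCEDRIN X",
  "EXCEDRIN PM",
  "EXCEDRIN P M",
  "EXCEDRIN P.M",
  "EXCERIN PM",
  "TRL-SZ EXCEDRIN",
  "~EXCEDRIN P.M",
  "PANADOL",
  "DATRIL",
  "PAMPRIN",
  "~PAMPRIN",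
  "ANACIN-3",
  "ANACIN 3 ",
  "M/S ANACIN 3",
  "JHO-ANACIN 3",
  "ANACIN A/F",
  "~ANACIN A/F",
  "~ASP FREE ANANCIN",
  "~ASPIRIN FREE ANACIN",
  "DOM NON-ASP",
  "DOM NON ASP",
  "DOM X/S NON",
  "DOM X-STR NON",
  "DOM REG STR NON",
  "DOM CHILD CHEW",
  "DOM CHILDS",
  "DOM E/S NON",
  "DOM ADDED STRENGTH A",
  "DOM X/S PAIN RELIEVE",
  "ST JOSEPH A/F",
  "TC NON-ASP",
  "TC X/STR N/A",
  "TEMPRA",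
  "FEVERALL",
  "DORCOL",
  "FEVERNOL",
  "LIQUIPRIN",
  "PEDIA CARE INFANT",
  "$TC PAIN REL INFANT",
  "CHILD CHEW FRT TYLE",
  "CHILD CHEW GRAP TYLE",
  "TS TYLENOL CHEW",
  "CHLDRN PANADOL",
  "VALUE TIME ACETA",
  "MIDOL CAPLET",
  "MIDOL CAPLETS MAX",
  "MIDOL M/S",
  "MIDOL MAXIMUM",
  "MIDOL PM",
  "MIDOL PMS",
  "MIDOLPMS",
  "T/S MIDOL PM",
  "~MIDOL PM",
  "TEEN MIDOL",
  "~TEEN MIDOL",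
  "PREMSYN PMS",
  "PMS BALANCE",
  "~TC PMS",
  "X/S CAPLETS",
  "XS LIQUID",
  "X/S TYLENOL",
  "YL PHARMACIST",
  "E.S TYLENOL",
  "ES TYLENOL",
  "EX STR TYLENOL",
  "EX TYLENOL",
  "TRL-SZ EXCEDRIN",
  "~TYLENOL",
  "~ANACIN A/F"]

def aspKeys : List String := ["ASPIRIN",
  "BAYER",
  "~BAYER",
  "BUFFERIN",
  "~BUFFERIN",
  "ASCRIPTIN",
  "~ACSRIPTIN",
  "ECOTRIN",
  "EMPIRIN",
  "HALFRIN",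
  "NORWICH",
  "VALUE TIME ASP",
  "DOM COATED ASP",
  "DOM ENTERIC COATED",
  "DOM TRI0BUFFERED",
  "RUGBY COATED ASPIRIN",
  "GENUINE BAYER",
  "EXTRA STRENGTH BAYER",
  "CAMA ARTHRITIS",
  "VANQUISH",
  "COPE TABS",
  "MOMENTUM CAP",
  "MOMENTUN CAP",
  "~MOMENTUM",
  "BACKAID",
  "B.C ",
  "BC HEADACHE",
  "CONGESPIRIN",
  "DOMINICKS CHILD ASPI",
  "ANACIN TABS",
  "ANACIN CAP",
  "ANACIN CPLT",
  "ANACIN MAX",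
  "ANACIN ARTH",
  "ANACIN TABLETS",
  "JHO-ANACIN PEGABLE",
  "T/S F/S ANACIN PM",
  "ARTH FNDTN ASP",
  "~ANACIN 125",
  "~ANACIN EASY",
  "~ANACIN MAX TAB",
  "~ANANCIN PAIN FORM",
  "MAX BAYER",
  "EX BAYER",
  "F/S BAYER",
  "T/S BAYER",
  "F/S NORWICH"]

-- each 'for k in KEYS: if k.upper() in d: return LBL' loop is the corresponding List.any
def classify_py (descrip : String) : String :=
  let d := PySem.Str.upper descrip
  if ibuKeys.any (fun k => PySem.Str.isIn (PySem.Str.upper k) d) then "IBU"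
  else if acetKeys.any (fun k => PySem.Str.isIn (PySem.Str.upper k) d) then "ACET"
  else if aspKeys.any (fun k => PySem.Str.isIn (PySem.Str.upper k) d) then "ASP"
  else "OTHER"

-- ===== PORT B =====
-- the flat one-table spec: each entry is a class label, a colon, then the key
def tableEntries : List String := ["IBU:ADVIL",
  "IBU:#ADVIL",
  "IBU:MOTRIN",
  "IBU:#MOTRIN",
  "IBU:~MOTRIN",
  "IBU:IBUPROFEN",
  "IBU:NUPRIN",
  "IBU:~NUPRIN",
  "IBU:ALEVE",
  "IBU:IBUPRIN",
  "IBU:ACTRON",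
  "IBU:ORUDIS",
  "IBU:HALTRAN",
  "IBU:MEDIPREN",
  "IBU:MIDOL 200",
  "IBU:MIDOL IB",
  "IBU:~MIDOL IB",
  "IBU:MYDOL 200",
  "IBU:MENADOL",
  "IBU:TRENDAR",
  "IBU:VITALAN",
  "IBU:DOM IBUPROFEN",
  "IBU:DOMINICKS TAB-PROFEN",
  "IBU:TC IBUROFEN",
  "IBU:TOPCARE IBUPROFEN",
  "IBU:EXCEDRIN IB",
  "IBU:~EXCEDRIN IB",
  "IBU:~ARTH FNDT IB",
  "IBU:F/S ADVIL",
  "IBU:TRL-SZ ADVIL",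
  "IBU:TRL-SZ MOTRIN",
  "ACET:TYLENOL",
  "ACET:TYLNL",
  "ACET:ACETAMINOPHEN",
  "ACET:EXCEDRIN ASPIRIN-FREE",
  "ACET:EXCEDRIN A/F",
  "ACET:A/F EXCEDRIN",
  "ACET:A/F 20 CT EXCEDRIN",
  "ACET:A/F 80 CT EXCEDRIN",
  "ACET:~A/F 40 CT EXCEDRIN",
  "ACET:*EXCEDRIN",
  "ACET:EXCEDRIN 175",
  "ACET:EXCEDRIN CAPS",
  "ACET:EXCEDRIN CAP ",
  "ACET:EXCEDRIN DUAL",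
  "ACET:EXCEDRIN GELTAB",
  "ACET:EXCEDRIN TAB",
  "ACET:EXCEDRIN TABS",
  "ACET:EXCEDRIN X",
  "ACET:EXCEDRIN PM",
  "ACET:EXCEDRIN P M",
  "ACET:EXCEDRIN P.M",
  "ACET:EXCERIN PM",
  "ACET:TRL-SZ EXCEDRIN",
  "ACET:~EXCEDRIN P.M",
  "ACET:PANADOL",
  "ACET:DATRIL",
  "ACET:PAMPRIN",
  "ACET:~PAMPRIN",
  "ACET:ANACIN-3",
  "ACET:ANACIN 3 ",
  "ACET:M/S ANACIN 3",
  "ACET:JHO-ANACIN 3",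
  "ACET:ANACIN A/F",
  "ACET:~ANACIN A/F",
  "ACET:~ASP FREE ANANCIN",
  "ACET:~ASPIRIN FREE ANACIN",
  "ACET:DOM NON-ASP",
  "ACET:DOM NON ASP",
  "ACET:DOM X/S NON",
  "ACET:DOM X-STR NON",
  "ACET:DOM REG STR NON",
  "ACET:DOM CHILD CHEW",
  "ACET:DOM CHILDS",
  "ACET:DOM E/S NON",
  "ACET:DOM ADDED STRENGTH A",
  "ACET:DOM X/S PAIN RELIEVE",
  "ACET:ST JOSEPH A/F",
  "ACET:TC NON-ASP",
  "ACET:TC X/STR N/A",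
  "ACET:TEMPRA",
  "ACET:FEVERALL",
  "ACET:DORCOL",
  "ACET:FEVERNOL",
  "ACET:LIQUIPRIN",
  "ACET:PEDIA CARE INFANT",
  "ACET:$TC PAIN REL INFANT",
  "ACET:CHILD CHEW FRT TYLE",
  "ACET:CHILD CHEW GRAP TYLE",
  "ACET:TS TYLENOL CHEW",
  "ACET:CHLDRN PANADOL",
  "ACET:VALUE TIME ACETA",
  "ACET:MIDOL CAPLET",
  "ACET:MIDOL CAPLETS MAX",
  "ACET:MIDOL M/S",
  "ACET:MIDOL MAXIMUM",
  "ACET:MIDOL PM",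
  "ACET:MIDOL PMS",
  "ACET:MIDOLPMS",
  "ACET:T/S MIDOL PM",
  "ACET:~MIDOL PM",
  "ACET:TEEN MIDOL",
  "ACET:~TEEN MIDOL",
  "ACET:PREMSYN PMS",
  "ACET:PMS BALANCE",
  "ACET:~TC PMS",
  "ACET:X/S CAPLETS",
  "ACET:XS LIQUID",
  "ACET:X/S TYLENOL",
  "ACET:YL PHARMACIST",
  "ACET:E.S TYLENOL",
  "ACET:ES TYLENOL",
  "ACET:EX STR TYLENOL",
  "ACET:EX TYLENOL",
  "ACET:TRL-SZ EXCEDRIN",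
  "ACET:~TYLENOL",
  "ACET:~ANACIN A/F",
  "ASP:ASPIRIN",
  "ASP:BAYER",
  "ASP:~BAYER",
  "ASP:BUFFERIN",
  "ASP:~BUFFERIN",
  "ASP:ASCRIPTIN",
  "ASP:~ACSRIPTIN",
  "ASP:ECOTRIN",
  "ASP:EMPIRIN",
  "ASP:HALFRIN",
  "ASP:NORWICH",
  "ASP:VALUE TIME ASP",
  "ASP:DOM COATED ASP",
  "ASP:DOM ENTERIC COATED",
  "ASP:DOM TRI0BUFFERED",
  "ASP:RUGBY COATED ASPIRIN",
  "ASP:GENUINE BAYER",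
  "ASP:EXTRA STRENGTH BAYER",
  "ASP:CAMA ARTHRITIS",
  "ASP:VANQUISH",
  "ASP:COPE TABS",
  "ASP:MOMENTUM CAP",
  "ASP:MOMENTUN CAP",
  "ASP:~MOMENTUM",
  "ASP:BACKAID",
  "ASP:B.C ",
  "ASP:BC HEADACHE",
  "ASP:CONGESPIRIN",
  "ASP:DOMINICKS CHILD ASPI",
  "ASP:ANACIN TABS",
  "ASP:ANACIN CAP",
  "ASP:ANACIN CPLT",
  "ASP:ANACIN MAX",
  "ASP:ANACIN ARTH",
  "ASP:ANACIN TABLETS",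
  "ASP:JHO-ANACIN PEGABLE",
  "ASP:T/S F/S ANACIN PM",
  "ASP:ARTH FNDTN ASP",
  "ASP:~ANACIN 125",
  "ASP:~ANACIN EASY",
  "ASP:~ANACIN MAX TAB",
  "ASP:~ANANCIN PAIN FORM",
  "ASP:MAX BAYER",
  "ASP:EX BAYER",
  "ASP:F/S BAYER",
  "ASP:T/S BAYER",
  "ASP:F/S NORWICH"]

def classOrder : List String := ["IBU", "ACET", "ASP"]

-- module-level build of _KEY_RANK: 'label, key = e.split(":", 1)' then
-- 'setdefault(key.upper(), _CLASS_ORDER.index(label))' (first rank wins).  Every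
-- entry is a well-formed class-prefixed literal, so the split always yields two parts
-- and the label is always found: the .getD defaults only totalize, they are never hit.
def keyRank : PySem.Dict String Int :=
  tableEntries.foldl
    (fun dt e =>
      let parts := (PySem.Str.splitMax? e ":" 1).getD []
      let label := (PySem.List.pyGet? parts 0).getD ""
      let key := (PySem.List.pyGet? parts 1).getD ""
      dt.setdefault (PySem.Str.upper key) (((PySem.List.index? classOrder label).getD 0 : Nat) : Int))
    PySem.Dict.empty

-- _LENGTHS = sorted({len(k) for k in _KEY_RANK})
def lengths : List Int :=
  PySem.List.sorted (PySem.Set.ofList (keyRank.keys.map (fun k => PySem.Str.len k))) (fun x => x)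

def classify_py_alt (descrip : String) : String :=
  let d := PySem.Str.upper descrip
  let best := (PySem.List.pyRange 0 (PySem.Str.len d)).foldl
    (fun b i => lengths.foldl
      (fun b n =>
        let r := PySem.Dict.getD keyRank (PySem.Str.slice d (some i) (some (i + n))) 3
        if r < b then r else b) b) 3
  if best = 0 then "IBU" else if best = 1 then "ACET" else if best = 2 then "ASP" else "OTHER"

-- ===== PRECONDITION & SPEC =====
def Spec_classify_py (descrip : String) (out : String) : Prop := out = classify_py_alt descrip
instance (descrip : String) (out : String) : Decidable (Spec_classify_py descrip out) := by unfold Spec_classify_py; infer_instance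

-- ===== CLAIM (what is proved, stated in full; the proofs are below) =====
def Claim_equal_classify_py : Prop := ∀ (descrip : String), Dom_classify_py descrip → Spec_classify_py descrip (classify_py descrip)

-- ===== LEMMAS AND PROOFS =====

-- the (upper key, rank) pair an entry parses to
def entryPair (e : String) : String × Int :=
  let parts := (PySem.Str.splitMax? e ":" 1).getD []
  let label := (PySem.List.pyGet? parts 0).getD ""
  let key := (PySem.List.pyGet? parts 1).getD ""
  (PySem.Str.upper key, (((PySem.List.index? classOrder label).getD 0 : Nat) : Int))

theorem keyRank_pairs : keyRank =
    (tableEntries.map entryPair).foldl (fun dt p => dt.setdefault p.1 p.2) PySem.Dict.empty := by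
  rw [List.foldl_map]; rfl

-- parsing the flat table recovers exactly A's key lists with their class ranks
set_option maxRecDepth 100000 in
set_option maxHeartbeats 4000000 in
theorem pairs_eq : tableEntries.map entryPair =
    ibuKeys.map (fun k => (PySem.Str.upper k, (0 : Int))) ++
      acetKeys.map (fun k => (PySem.Str.upper k, 1)) ++
      aspKeys.map (fun k => (PySem.Str.upper k, 2)) := by decide

-- the value list the scan's running minimum effectively folds over
def vals (d : String) : List Int :=
  (PySem.List.pyRange 0 (PySem.Str.len d)).flatMap
    (fun i => lengths.map (fun n =>
      PySem.Dict.getD keyRank (PySem.Str.slice d (some i) (some (i + n))) 3))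

-- first-match rank of a candidate substring (0 IBU, 1 ACET, 2 ASP, 3 none)
def rankOf (s : String) : Int :=
  if s ∈ ibuKeys.map PySem.Str.upper then 0
  else if s ∈ acetKeys.map PySem.Str.upper then 1
  else if s ∈ aspKeys.map PySem.Str.upper then 2
  else 3

def hasKey (ks : List String) (d : String) : Prop :=
  ∃ k ∈ ks, PySem.Str.isIn (PySem.Str.upper k) d = true

-- closed-form facts about the literal key data
set_option maxRecDepth 100000 in
set_option maxHeartbeats 4000000 in
theorem lengths_eq : lengths = [4, 5, 6, 7, 8, 9, 10, 11, 12, 13, 14, 15, 16, 17, 18, 19, 20, 21] := by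
  unfold lengths
  rw [keyRank_pairs, pairs_eq]
  decide

set_option maxRecDepth 100000 in
theorem len_mem_lengths' : ∀ k ∈ ibuKeys ++ acetKeys ++ aspKeys,
    PySem.Str.len (PySem.Str.upper k) ∈ ([4, 5, 6, 7, 8, 9, 10, 11, 12, 13, 14, 15, 16, 17, 18, 19, 20, 21] : List Int) := by decide

theorem len_mem_lengths : ∀ k ∈ ibuKeys ++ acetKeys ++ aspKeys,
    PySem.Str.len (PySem.Str.upper k) ∈ lengths := by
  rw [lengths_eq]; exact len_mem_lengths'

theorem nonneg_lengths : ∀ n ∈ lengths, (0 : Int) ≤ n := by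
  rw [lengths_eq]; decide

set_option maxRecDepth 100000 in
theorem keys_ne_empty : ∀ k ∈ ibuKeys ++ acetKeys ++ aspKeys, (PySem.Str.upper k).toList ≠ [] := by decide

-- running-minimum fold facts
theorem foldl_min_le_init (l : List Int) (a : Int) : l.foldl min a ≤ a := by
  induction l generalizing a with
  | nil => simp
  | cons x l ih => exact le_trans (ih (min a x)) (min_le_left a x)

theorem foldl_min_le_mem (l : List Int) (a x : Int) (hx : x ∈ l) : l.foldl min a ≤ x := by
  induction l generalizing a with
  | nil => cases hx
  | cons y l ih =>
    rcases List.mem_cons.mp hx with h | h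
    · subst h
      exact le_trans (foldl_min_le_init l (min a x)) (min_le_right a x)
    · exact ih (min a y) h

theorem le_foldl_min (l : List Int) (a m : Int) (ha : m ≤ a) (h : ∀ x ∈ l, m ≤ x) :
    m ≤ l.foldl min a := by
  induction l generalizing a with
  | nil => exact ha
  | cons y l ih =>
    exact ih (min a y) (le_min ha (h y List.mem_cons_self)) (fun x hx => h x (List.mem_cons_of_mem y hx))

-- the scan's fold IS a min-fold over vals
theorem foldl_if_min (f : Int → Int) (l : List Int) (b : Int) :
    l.foldl (fun b n => let r := f n; if r < b then r else b) b = (l.map f).foldl min b := by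
  induction l generalizing b with
  | nil => rfl
  | cons x l ih =>
    simp only [List.foldl_cons, List.map_cons]
    have h : (let r := f x; if r < b then r else b) = min b (f x) := by
      simp only [min_def]; split_ifs <;> omega
    rw [h, ih]

theorem best_eq (d : String) :
    ((PySem.List.pyRange 0 (PySem.Str.len d)).foldl
      (fun b i => lengths.foldl
        (fun b n =>
          let r := PySem.Dict.getD keyRank (PySem.Str.slice d (some i) (some (i + n))) 3
          if r < b then r else b) b) 3) = (vals d).foldl min 3 := by
  unfold vals
  rw [List.foldl_flatMap]
  simp only [foldl_if_min, List.foldl_map]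

-- the dict built by the setdefault loop: lookup = first matching pair's rank
theorem get?_fold_setdefault_pairs (ps : List (String × Int)) (d : PySem.Dict String Int) (s : String) :
    (ps.foldl (fun dt p => dt.setdefault p.1 p.2) d).get? s =
      (d.get? s).or ((ps.find? (fun p => p.1 == s)).map (·.2)) := by
  induction ps generalizing d with
  | nil => simp
  | cons p t ih =>
    simp only [List.foldl_cons, ih, List.find?_cons]
    by_cases hs : s = p.1
    · rw [hs, PySem.Dict.get?_setdefault_self]
      simp only [beq_self_eq_true]
      cases h : d.get? p.1 <;> simp
    · rw [PySem.Dict.get?_setdefault_of_ne d p.2 hs]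
      have hb : (p.1 == s) = false := by simpa using fun h => hs h.symm
      simp [hb]

theorem getD_keyRank (s : String) : keyRank.getD s 3 = rankOf s := by
  rw [PySem.Dict.getD_eq_get?_getD, keyRank_pairs, pairs_eq,
    get?_fold_setdefault_pairs, PySem.Dict.get?_empty, Option.none_or,
    List.find?_append, List.find?_append, List.find?_map, List.find?_map, List.find?_map]
  simp only [Function.comp_def]
  unfold rankOf
  cases hf0 : ibuKeys.find? (fun k => (PySem.Str.upper k, (0:Int)).1 == s) with
  | some k0 =>
    have hp := List.find?_some hf0
    have hm : s ∈ ibuKeys.map PySem.Str.upper :=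
      List.mem_map.mpr ⟨k0, List.mem_of_find?_eq_some hf0, by simpa using hp⟩
    simp [hm]
  | none =>
    have hm0 : s ∉ ibuKeys.map PySem.Str.upper := by
      rw [List.mem_map]
      rintro ⟨k, hk, rfl⟩
      have := List.find?_eq_none.mp hf0 k hk
      simp at this
    cases hf1 : acetKeys.find? (fun k => (PySem.Str.upper k, (1:Int)).1 == s) with
    | some k1 =>
      have hp := List.find?_some hf1
      have hm : s ∈ acetKeys.map PySem.Str.upper :=
        List.mem_map.mpr ⟨k1, List.mem_of_find?_eq_some hf1, by simpa using hp⟩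
      simp [hm, hm0]
    | none =>
      have hm1 : s ∉ acetKeys.map PySem.Str.upper := by
        rw [List.mem_map]
        rintro ⟨k, hk, rfl⟩
        have := List.find?_eq_none.mp hf1 k hk
        simp at this
      cases hf2 : aspKeys.find? (fun k => (PySem.Str.upper k, (2:Int)).1 == s) with
      | some k2 =>
        have hp := List.find?_some hf2
        have hm : s ∈ aspKeys.map PySem.Str.upper :=
          List.mem_map.mpr ⟨k2, List.mem_of_find?_eq_some hf2, by simpa using hp⟩
        simp [hm, hm0, hm1]
      | none =>
        have hm2 : s ∉ aspKeys.map PySem.Str.upper := by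
          rw [List.mem_map]
          rintro ⟨k, hk, rfl⟩
          have := List.find?_eq_none.mp hf2 k hk
          simp at this
        simp [hm0, hm1, hm2]

-- any slice the scan looks at is an infix of d
theorem slice_infix (d : String) (i n : Int) (hi : 0 ≤ i) (hn : 0 ≤ n) :
    (PySem.Str.slice d (some i) (some (i + n))).toList <:+: d.toList := by
  rw [PySem.Str.toList_slice, PySem.Chars.slice_eq_listSlice, PySem.List.slice_toNat d.toList hi (by omega)]
  exact ((List.take_prefix _ _).isInfix).trans ((List.drop_suffix _ _).isInfix)

theorem vals_cases (d : String) (v : Int) (hv : v ∈ vals d) :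
    v = 3 ∨ (v = 0 ∧ hasKey ibuKeys d) ∨ (v = 1 ∧ hasKey acetKeys d) ∨ (v = 2 ∧ hasKey aspKeys d) := by
  unfold vals at hv
  rcases List.mem_flatMap.mp hv with ⟨i, hi, hv⟩
  rcases List.mem_map.mp hv with ⟨n, hn, rfl⟩
  have hi0 : 0 ≤ i := (PySem.List.mem_pyRange_one.mp hi).1
  have hinf := slice_infix d i n hi0 (nonneg_lengths n hn)
  rw [getD_keyRank]
  unfold rankOf
  split_ifs with h1 h2 h3
  · rcases List.mem_map.mp h1 with ⟨k, hk, hks⟩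
    exact Or.inr (Or.inl ⟨rfl, k, hk, by rw [PySem.Str.isIn_iff_infix, hks]; exact hinf⟩)
  · rcases List.mem_map.mp h2 with ⟨k, hk, hks⟩
    exact Or.inr (Or.inr (Or.inl ⟨rfl, k, hk, by rw [PySem.Str.isIn_iff_infix, hks]; exact hinf⟩))
  · rcases List.mem_map.mp h3 with ⟨k, hk, hks⟩
    exact Or.inr (Or.inr (Or.inr ⟨rfl, k, hk, by rw [PySem.Str.isIn_iff_infix, hks]; exact hinf⟩))
  · exact Or.inl rfl

-- a key occurring in d contributes its rank to vals
theorem key_hit (d k : String) (hmem : k ∈ ibuKeys ++ acetKeys ++ aspKeys)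
    (hk : PySem.Str.isIn (PySem.Str.upper k) d = true) :
    rankOf (PySem.Str.upper k) ∈ vals d := by
  rw [PySem.Str.isIn_eq] at hk
  obtain ⟨j, hpre⟩ := (PySem.Chars.exists_prefix_drop_iff_isIn _ _).mpr hk
  have hne := keys_ne_empty k hmem
  have hj : j < d.toList.length := by
    by_contra h
    rw [not_lt] at h
    rw [List.drop_eq_nil_of_le h] at hpre
    exact hne (List.prefix_nil.mp hpre)
  unfold vals
  refine List.mem_flatMap.mpr ⟨(j : Int), PySem.List.mem_pyRange_one.mpr
    ⟨by positivity, by rw [PySem.Str.len_eq]; exact_mod_cast hj⟩, ?_⟩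
  refine List.mem_map.mpr ⟨PySem.Str.len (PySem.Str.upper k), len_mem_lengths k hmem, ?_⟩
  have hslice : PySem.Str.slice d (some (j : Int))
      (some ((j : Int) + PySem.Str.len (PySem.Str.upper k))) = PySem.Str.upper k := by
    rw [← String.toList_inj, PySem.Str.toList_slice, PySem.Chars.slice_eq_listSlice,
      PySem.Str.len_eq, PySem.List.slice_natCast_add]
    exact (List.prefix_iff_eq_take.mp hpre).symm
  rw [hslice, getD_keyRank]

theorem rankOf_ibu (k : String) (hk : k ∈ ibuKeys) : rankOf (PySem.Str.upper k) = 0 := by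
  unfold rankOf
  rw [if_pos (List.mem_map.mpr ⟨k, hk, rfl⟩)]

theorem rankOf_acet (k : String) (hk : k ∈ acetKeys) : rankOf (PySem.Str.upper k) ≤ 1 := by
  unfold rankOf
  split_ifs with h1 h2
  · omega
  · omega
  · exact absurd (List.mem_map.mpr ⟨k, hk, rfl⟩) h2
  · exact absurd (List.mem_map.mpr ⟨k, hk, rfl⟩) h2

theorem rankOf_asp (k : String) (hk : k ∈ aspKeys) : rankOf (PySem.Str.upper k) ≤ 2 := by
  unfold rankOf
  split_ifs with h1 h2 h3
  · omega
  · omega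
  · omega
  · exact absurd (List.mem_map.mpr ⟨k, hk, rfl⟩) h3

-- ===== VERDICT (by name: the statement is the Claim_ definition above) =====
theorem classify_py_spec : Claim_equal_classify_py := by
  unfold Claim_equal_classify_py
  intro descrip _
  unfold Spec_classify_py classify_py classify_py_alt
  dsimp only
  rw [best_eq]
  set D := PySem.Str.upper descrip with hD
  by_cases h0 : ibuKeys.any (fun k => PySem.Str.isIn (PySem.Str.upper k) D) = true
  · obtain ⟨k, hk, hkin⟩ := List.any_eq_true.mp h0
    have hv := key_hit D k (List.mem_append_left _ (List.mem_append_left _ hk)) hkin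
    rw [rankOf_ibu k hk] at hv
    have hle : (vals D).foldl min 3 ≤ 0 := foldl_min_le_mem _ 3 _ hv
    have hge : 0 ≤ (vals D).foldl min 3 :=
      le_foldl_min _ _ _ (by norm_num) (fun v hvv => by
        rcases vals_cases D v hvv with rfl | ⟨rfl, _⟩ | ⟨rfl, _⟩ | ⟨rfl, _⟩ <;> omega)
    rw [if_pos h0, if_pos (le_antisymm hle hge)]
  · by_cases h1 : acetKeys.any (fun k => PySem.Str.isIn (PySem.Str.upper k) D) = true
    · obtain ⟨k, hk, hkin⟩ := List.any_eq_true.mp h1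
      have hv := key_hit D k (List.mem_append_left _ (List.mem_append_right _ hk)) hkin
      have hle : (vals D).foldl min 3 ≤ 1 :=
        le_trans (foldl_min_le_mem _ 3 _ hv) (rankOf_acet k hk)
      have hge : 1 ≤ (vals D).foldl min 3 :=
        le_foldl_min _ _ _ (by norm_num) (fun v hvv => by
          rcases vals_cases D v hvv with rfl | ⟨rfl, hib⟩ | ⟨rfl, _⟩ | ⟨rfl, _⟩
          · omega
          · exact absurd (List.any_eq_true.mpr hib) h0
          · omega
          · omega)
      have hb : (vals D).foldl min 3 = 1 := le_antisymm hle hge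
      rw [if_neg h0, if_pos h1, if_neg (by omega), if_pos hb]
    · by_cases h2 : aspKeys.any (fun k => PySem.Str.isIn (PySem.Str.upper k) D) = true
      · obtain ⟨k, hk, hkin⟩ := List.any_eq_true.mp h2
        have hv := key_hit D k (List.mem_append_right _ hk) hkin
        have hle : (vals D).foldl min 3 ≤ 2 :=
          le_trans (foldl_min_le_mem _ 3 _ hv) (rankOf_asp k hk)
        have hge : 2 ≤ (vals D).foldl min 3 :=
          le_foldl_min _ _ _ (by norm_num) (fun v hvv => by
            rcases vals_cases D v hvv with rfl | ⟨rfl, hib⟩ | ⟨rfl, hac⟩ | ⟨rfl, _⟩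
            · omega
            · exact absurd (List.any_eq_true.mpr hib) h0
            · exact absurd (List.any_eq_true.mpr hac) h1
            · omega)
        have hb : (vals D).foldl min 3 = 2 := le_antisymm hle hge
        rw [if_neg h0, if_neg h1, if_pos h2, if_neg (by omega), if_neg (by omega), if_pos hb]
      · have hb : (vals D).foldl min 3 = 3 :=
          le_antisymm (foldl_min_le_init _ _)
            (le_foldl_min _ _ _ le_rfl (fun v hvv => by
              rcases vals_cases D v hvv with rfl | ⟨rfl, hib⟩ | ⟨rfl, hac⟩ | ⟨rfl, has⟩
              · omega
              · exact absurd (List.any_eq_true.mpr hib) h0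
              · exact absurd (List.any_eq_true.mpr hac) h1
              · exact absurd (List.any_eq_true.mpr has) h2))
        rw [if_neg h0, if_neg h1, if_neg h2, if_neg (by omega), if_neg (by omega), if_neg (by omega)]
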